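-- pv_equiv track=rewrite | github.com/Dei1400/Dei1400 | Portafolio2_DeilySalazar2020426180/5_nuevoNumImpares.py | imparesAuxNegativos
-- ===== SOURCE A (Python) =====
-- def imparesAuxNegativos(num, res, pot):
--      if res < 0 :
--           return res
--      elif num == 0 :
--           return imparesAuxNegativos(num, res*-1, pot)
--      else:
--           if (num%10)%2 == 0 :
--                return imparesAuxNegativos(num//10, res, pot)
--           else:
--                return imparesAuxNegativos(num//10, res+((num%10)*10**pot), pot+1)
-- ===== SOURCE B (Python) =====
-- def imparesAuxNegativos(num, res, pot):
--     if res < 0: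
--         return res
--     odds = []
--     n = num
--     while n > 0:
--         d = n % 10
--         if d % 2 == 1:
--             odds.append(d)
--         n //= 10
--     return -(res + sum(d * 10 ** (pot + i) for i, d in enumerate(odds)))
-- ===== Notes on version B (the rewrite author's own statement) =====
-- stated objective: idiomatic
-- what changed: B replaces A's three-state tail recursion (with its res<0 sentinel and the re-entry trick that negates res when num reaches 0) by a straight-line version: collect the odd digits into a list with one while loop, then return the negation of res plus a single enumerate-powered sum.
-- outside the precondition, e.g. on imparesAuxNegativos(2147483647, 2147483648, -2): A returns -2147483665.3700004, B returns -2147483665.37; on imparesAuxNegativos(0, 0, 0): A does not finish within the time limit, B returns 0; on imparesAuxNegativos(-1, 0, 0): A does not finish within the time limit, B returns 0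
import Mathlib
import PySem

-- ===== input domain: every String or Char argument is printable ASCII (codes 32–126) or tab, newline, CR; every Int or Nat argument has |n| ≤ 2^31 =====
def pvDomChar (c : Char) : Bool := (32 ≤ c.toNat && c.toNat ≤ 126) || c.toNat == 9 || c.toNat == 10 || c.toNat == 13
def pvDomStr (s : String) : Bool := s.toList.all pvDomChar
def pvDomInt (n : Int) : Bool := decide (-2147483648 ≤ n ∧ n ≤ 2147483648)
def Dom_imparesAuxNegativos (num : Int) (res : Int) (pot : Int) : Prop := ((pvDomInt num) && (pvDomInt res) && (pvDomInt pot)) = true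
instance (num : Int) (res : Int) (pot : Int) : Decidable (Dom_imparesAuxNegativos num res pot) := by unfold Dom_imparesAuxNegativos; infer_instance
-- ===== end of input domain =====

-- B is a different decomposition of A (collect odd digits, then one sum and one negation);
-- equal to A on Pre_, which excludes the inputs where A diverges or returns a float.

-- ===== PORT A =====
-- A is a tail recursion that diverges on some inputs; the port adds a fuel counter as a
-- totality guard (Pre_ inputs terminate in far fewer steps than the constant fuel used below).
-- 10**pot is ported as (10:Int) ^ pot.toNat, exact for pot ≥ 0 (negative pot is outside Pre_).
def imparesAuxNegativosFuel (fuel : Nat) (num : Int) (res : Int) (pot : Int) : Int :=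
  match fuel with
  | 0 => 0
  | f + 1 =>
    if res < 0 then res
    else if num = 0 then imparesAuxNegativosFuel f num (res * -1) pot
    else if PySem.Int.mod (PySem.Int.mod num 10) 2 = 0 then
      imparesAuxNegativosFuel f (PySem.Int.floordiv num 10) res pot
    else
      imparesAuxNegativosFuel f (PySem.Int.floordiv num 10)
        (res + (PySem.Int.mod num 10) * 10 ^ pot.toNat) (pot + 1)

def imparesAuxNegativos (num : Int) (res : Int) (pot : Int) : Int :=
  imparesAuxNegativosFuel 2147483650 num res pot

-- ===== PORT B =====
-- the while loop of Source B collecting the odd digits of n, low digit first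
def pvOddDigits (n : Int) : List Int :=
  if _h : 0 < n then
    (if PySem.Int.mod (PySem.Int.mod n 10) 2 = 1 then [PySem.Int.mod n 10] else [])
      ++ pvOddDigits (PySem.Int.floordiv n 10)
  else []
  termination_by n.toNat
  decreasing_by
    have := PySem.Int.floordiv_eq_ediv_of_pos (a := n) (b := 10) (by omega)
    rw [this]; omega

-- 10**(pot+i) ported as (10:Int) ^ (pot+i).toNat, exact for pot ≥ 0 (negative pot outside Pre_)
def imparesAuxNegativos_alt (num : Int) (res : Int) (pot : Int) : Int :=
  if res < 0 then res
  else
    -(res + (PySem.List.enumerate (pvOddDigits num) 0).foldl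
        (fun acc p => acc + p.2 * 10 ^ (pot + p.1).toNat) 0)

-- ===== PRECONDITION & SPEC =====

-- does n have an odd decimal digit? (closed form via the standard library's digit list)
def pvHasOddDigit (n : Int) : Bool := (Nat.digits 10 n.toNat).any (fun d => d % 2 = 1)

-- Pre_ excludes exactly the inputs on which the Python A does not return an int:
-- it diverges when num < 0, or when num reaches 0 with res still 0 (then res*-1 == 0 loops),
-- and it returns a float when pot < 0 and an odd digit is met (10**pot is a float).
def Pre_imparesAuxNegativos (num : Int) (res : Int) (pot : Int) : Prop :=
  res < 0 ∨ (0 ≤ num ∧ (0 < res ∨ pvHasOddDigit num = true) ∧ (0 ≤ pot ∨ pvHasOddDigit num = false))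
instance (num : Int) (res : Int) (pot : Int) : Decidable (Pre_imparesAuxNegativos num res pot) := by
  unfold Pre_imparesAuxNegativos; infer_instance

def pvWitness_imparesAuxNegativos : Int × Int × Int := (1573, 0, 0)

def Spec_imparesAuxNegativos (num : Int) (res : Int) (pot : Int) (out : Int) : Prop := out = imparesAuxNegativos_alt num res pot
instance (num : Int) (res : Int) (pot : Int) (out : Int) : Decidable (Spec_imparesAuxNegativos num res pot out) := by unfold Spec_imparesAuxNegativos; infer_instance

-- ===== CLAIM (what is proved, stated in full; the proofs are below) =====
def Claim_equal_imparesAuxNegativos : Prop := ∀ (num : Int) (res : Int) (pot : Int), Dom_imparesAuxNegativos num res pot → Pre_imparesAuxNegativos num res pot → Spec_imparesAuxNegativos num res pot (imparesAuxNegativos num res pot)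

-- ===== LEMMAS AND PROOFS =====
-- Has the last digit of n (n ≥ 0), or any digit above it, odd?
def pvHasOdd (n : Int) : Bool :=
  if _h : 0 < n then
    if PySem.Int.mod (PySem.Int.mod n 10) 2 = 1 then true
    else pvHasOdd (PySem.Int.floordiv n 10)
  else false
  termination_by n.toNat
  decreasing_by
    have := PySem.Int.floordiv_eq_ediv_of_pos (a := n) (b := 10) (by omega)
    rw [this]; omega

theorem pvHasOdd_eq_digits (n : Int) (hn : 0 ≤ n) :
    pvHasOdd n = pvHasOddDigit n := by
  unfold pvHasOdd pvHasOddDigit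
  rw [show PySem.Int.mod n 10 = n % 10 from PySem.Int.mod_eq_emod_of_pos (by norm_num),
      show PySem.Int.mod (n % 10) 2 = (n % 10) % 2 from PySem.Int.mod_eq_emod_of_pos (by norm_num),
      show PySem.Int.floordiv n 10 = n / 10 from PySem.Int.floordiv_eq_ediv_of_pos (by norm_num)]
  by_cases h : 0 < n
  · rw [dif_pos h]
    rw [Nat.digits_def' (by norm_num : 1 < 10) (by omega : 0 < n.toNat)]
    have hmod : n % 10 = ((n.toNat % 10 : Nat) : Int) := by omega
    have hdiv : n / 10 = ((n.toNat / 10 : Nat) : Int) := by omega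
    have hpar : ((n % 10) % 2 = 1) ↔ ((n.toNat % 10) % 2 = 1) := by omega
    by_cases hp : (n % 10) % 2 = 1
    · rw [if_pos hp]
      simp [List.any_cons, hpar.mp hp]
    · rw [if_neg hp]
      have hp' : ¬ (n.toNat % 10) % 2 = 1 := fun hc => hp (hpar.mpr hc)
      have ih := pvHasOdd_eq_digits (n / 10) (by omega)
      unfold pvHasOddDigit at ih
      rw [ih]
      have hnt : (n / 10).toNat = n.toNat / 10 := by omega
      rw [hnt, List.any_cons, decide_eq_false hp', Bool.false_or]
  · rw [dif_neg h]
    have h0 : n = 0 := by omega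
    subst h0
    simp
  termination_by n.toNat
  decreasing_by all_goals omega

-- semantic odd-digit sum: value added to res by the remaining digits of n, next exponent q
def pvS (n : Int) (q : Int) : Int :=
  if _h : 0 < n then
    if (n % 10) % 2 = 1 then (n % 10) * 10 ^ q.toNat + pvS (n / 10) (q + 1)
    else pvS (n / 10) q
  else 0
  termination_by n.toNat
  decreasing_by all_goals omega

def pvSumList (l : List Int) (q : Int) : Int :=
  match l with
  | [] => 0
  | d :: t => d * 10 ^ q.toNat + pvSumList t (q + 1)

theorem pvS_nonneg (n q : Int) : 0 ≤ pvS n q := by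
  unfold pvS
  split_ifs with h h2
  · have hd : 0 ≤ n % 10 := by omega
    have := pvS_nonneg (n / 10) (q + 1)
    positivity
  · exact pvS_nonneg (n / 10) q
  · exact le_rfl
  termination_by n.toNat
  decreasing_by all_goals omega

theorem pvS_pos (n q : Int) (h : pvHasOdd n = true) : 0 < pvS n q := by
  unfold pvS
  unfold pvHasOdd at h
  rw [PySem.Int.mod_eq_emod_of_pos (by norm_num), PySem.Int.mod_eq_emod_of_pos (by norm_num),
      PySem.Int.floordiv_eq_ediv_of_pos (by norm_num)] at h
  split_ifs with h1 h2
  · have : 1 ≤ n % 10 := by omega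
    have := pvS_nonneg (n / 10) (q + 1)
    have : (0:Int) < 10 ^ q.toNat := by positivity
    nlinarith
  · simp only [dif_pos h1, if_neg h2] at h
    exact pvS_pos (n / 10) q h
  · simp at h; omega
  termination_by n.toNat
  decreasing_by all_goals omega

theorem pvS_zero (q : Int) : pvS 0 q = 0 := by unfold pvS; simp

theorem pvOddDigits_sum (n q : Int) : pvSumList (pvOddDigits n) q = pvS n q := by
  unfold pvOddDigits pvS
  rw [show PySem.Int.mod n 10 = n % 10 from PySem.Int.mod_eq_emod_of_pos (by norm_num),
      show PySem.Int.mod (n % 10) 2 = (n % 10) % 2 from PySem.Int.mod_eq_emod_of_pos (by norm_num),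
      show PySem.Int.floordiv n 10 = n / 10 from PySem.Int.floordiv_eq_ediv_of_pos (by norm_num)]
  split_ifs with h1 h2
  · simp [pvSumList, pvOddDigits_sum (n / 10) (q + 1)]
  · simp [pvOddDigits_sum (n / 10) q]
  · simp [pvSumList]
  termination_by n.toNat
  decreasing_by all_goals omega

theorem pvEnum_foldl (pot : Int) (l : List Int) : ∀ (s c : Int),
    (PySem.List.enumerate l s).foldl (fun acc p => acc + p.2 * 10 ^ (pot + p.1).toNat) c
      = c + pvSumList l (pot + s) := by
  induction l with
  | nil => intro s c; simp [PySem.List.enumerate_nil, pvSumList]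
  | cons d t ih =>
    intro s c
    rw [PySem.List.enumerate_cons, List.foldl_cons, ih (s + 1), pvSumList]
    ring_nf

theorem pvFuel_eq (f : Nat) : ∀ (num res pot : Int), 0 ≤ num → 0 ≤ res →
    0 < res + pvS num pot → num.toNat + 2 ≤ f →
    imparesAuxNegativosFuel f num res pot = -(res + pvS num pot) := by
  induction f with
  | zero => intro num res pot _ _ _ hf; omega
  | succ f ih =>
    intro num res pot hnum hres hpos hf
    rw [imparesAuxNegativosFuel]
    rw [if_neg (by omega)]
    by_cases h0 : num = 0
    · subst h0
      rw [if_pos rfl]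
      rw [pvS_zero] at hpos ⊢
      match f, hf with
      | g + 1, _ =>
        rw [imparesAuxNegativosFuel, if_pos (by omega)]
        omega
    · rw [if_neg h0]
      rw [show PySem.Int.mod num 10 = num % 10 from PySem.Int.mod_eq_emod_of_pos (by norm_num),
          show PySem.Int.mod (num % 10) 2 = (num % 10) % 2 from PySem.Int.mod_eq_emod_of_pos (by norm_num),
          show PySem.Int.floordiv num 10 = num / 10 from PySem.Int.floordiv_eq_ediv_of_pos (by norm_num)]
      have hSunf : pvS num pot = if (num % 10) % 2 = 1 then (num % 10) * 10 ^ pot.toNat + pvS (num / 10) (pot + 1) else pvS (num / 10) pot := by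
        rw [pvS]; rw [dif_pos (by omega)]
      by_cases hpar : (num % 10) % 2 = 0
      · rw [if_pos hpar]
        rw [hSunf, if_neg (by omega)] at hpos ⊢
        exact ih _ _ _ (by omega) hres hpos (by omega)
      · rw [if_neg hpar]
        rw [hSunf, if_pos (by omega)] at hpos ⊢
        have hd : 0 ≤ num % 10 := Int.emod_nonneg num (by norm_num)
        have hp : (0:Int) < 10 ^ pot.toNat := by positivity
        have hrw := ih (num / 10) (res + num % 10 * 10 ^ pot.toNat) (pot + 1) (by omega)
          (by nlinarith) (by omega) (by omega)
        rw [hrw]; ring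

-- ===== VERDICT (by name: the statement is the Claim_ definition above) =====
theorem imparesAuxNegativos_spec : Claim_equal_imparesAuxNegativos := by
  intro num res pot hdom hpre
  unfold Spec_imparesAuxNegativos imparesAuxNegativos imparesAuxNegativos_alt
  by_cases hres : res < 0
  · rw [imparesAuxNegativosFuel, if_pos hres, if_pos hres]
  · rw [if_neg hres]
    rcases hpre with h | ⟨hnum, hodd, _⟩
    · omega
    · unfold Dom_imparesAuxNegativos pvDomInt at hdom
      simp only [Bool.and_eq_true, decide_eq_true_eq] at hdom
      have hpos : 0 < res + pvS num pot := by
        rcases hodd with h | h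
        · have := pvS_nonneg num pot; omega
        · have hb : pvHasOdd num = true := by rw [pvHasOdd_eq_digits num hnum]; exact h
          have := pvS_pos num pot hb; omega
      have hdomn : num.toNat + 2 ≤ 2147483650 := by omega
      rw [pvFuel_eq 2147483650 num res pot hnum (by omega) hpos hdomn]
      rw [pvEnum_foldl pot (pvOddDigits num) 0 0, pvOddDigits_sum]
      simp
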